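-- pv_equiv track=rewrite | github.com/arisxm/221-labs | Lab 5/F.py | max_diamonds
-- ===== SOURCE A (Python) =====
-- from collections import deque
--
-- def max_diamonds(rows, cols, grid):
--     visited = [[False for _ in range(cols)] for _ in range(rows)]
--     directions = [(-1, 0), (1, 0), (0, -1), (0, 1)]
--
--     def bfs(start_row, start_col):
--         queue = deque()
--         queue.append((start_row, start_col))
--         visited[start_row][start_col] = True
--
--         diamonds = 0
--         if grid[start_row][start_col] == 'D':
--             diamonds += 1
--
--         while queue:
--             row, col = queue.popleft()
--             for dr, dc in directions:
--                 new_row = row + dr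
--                 new_col = col + dc
--
--                 if 0 <= new_row < rows and 0 <= new_col < cols:
--                     if not visited[new_row][new_col] and grid[new_row][new_col] != '#':
--                         visited[new_row][new_col] = True
--                         queue.append((new_row, new_col))
--                         if grid[new_row][new_col] == 'D':
--                             diamonds += 1
--
--         return diamonds
--
--     max_diamond_count = 0
--     for r in range(rows):
--         for c in range(cols):
--             if not visited[r][c] and grid[r][c] != '#':
--                 current_count = bfs(r, c)
--                 if current_count > max_diamond_count:
--                     max_diamond_count = current_count
--
--     return max_diamond_count
-- ===== SOURCE B (Python) =====
-- def max_diamonds(rows, cols, grid):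
--     best = 0
--     done = set()
--     for r in range(rows):
--         for c in range(cols):
--             if grid[r][c] == '#' or (r, c) in done:
--                 continue
--             # saturate the whole component of (r, c) by repeated neighbour expansion
--             comp = {(r, c)}
--             for _ in range(rows * cols):
--                 new = comp | {
--                     (nr, nc)
--                     for (cr, cc) in comp
--                     for (nr, nc) in ((cr - 1, cc), (cr + 1, cc), (cr, cc - 1), (cr, cc + 1))
--                     if 0 <= nr < rows and 0 <= nc < cols and grid[nr][nc] != '#'
--                 }
--                 if len(new) == len(comp):
--                     break
--                 comp = new
--             done |= comp
--             d = sum(1 for (cr, cc) in comp if grid[cr][cc] == 'D')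
--             best = max(best, d)
--     return best
-- ===== Notes on version B (the rewrite author's own statement) =====
-- stated objective: alternative
-- what changed: Replaces A's per-cell BFS (deque + boolean visited matrix) by per-component whole-set neighbour expansion to a fixpoint over Python sets, with a 'done' set of already-counted cells instead of the visited matrix.
import Mathlib
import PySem

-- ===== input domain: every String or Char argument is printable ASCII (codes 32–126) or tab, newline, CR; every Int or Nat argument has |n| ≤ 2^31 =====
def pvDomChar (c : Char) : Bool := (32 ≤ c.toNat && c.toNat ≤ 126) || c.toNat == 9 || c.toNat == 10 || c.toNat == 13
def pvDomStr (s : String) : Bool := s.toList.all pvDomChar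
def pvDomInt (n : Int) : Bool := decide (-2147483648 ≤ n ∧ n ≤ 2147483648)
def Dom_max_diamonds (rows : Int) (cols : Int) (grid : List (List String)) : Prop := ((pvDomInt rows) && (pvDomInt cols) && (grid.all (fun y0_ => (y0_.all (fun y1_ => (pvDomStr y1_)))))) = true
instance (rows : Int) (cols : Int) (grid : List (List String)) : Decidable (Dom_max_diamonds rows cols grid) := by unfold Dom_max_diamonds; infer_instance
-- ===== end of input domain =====

-- B replaces A's per-cell BFS (queue + visited matrix) by whole-set neighbour-expansion to a
-- fixpoint per component, with a 'done' set of already-counted cells; objective: alternative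
-- (a genuinely different mechanism, not faster — A's BFS touches each cell once).

-- ===== PORT A =====
-- grid[r][c] (both Pythons index the grid exactly like this; guards keep the index in range)
def pvCell (grid : List (List String)) (r c : Int) : String :=
  PySem.List.pyGetD (PySem.List.pyGetD grid r []) c ""

-- visited[r][c]  /  visited[r][c] = True  (indices are guarded in range by A's code)
def pvGetV (v : List (List Bool)) (r c : Int) : Bool :=
  PySem.List.pyGetD (PySem.List.pyGetD v r []) c false

def pvSetV (v : List (List Bool)) (r c : Int) : List (List Bool) :=
  PySem.List.pySetD v r (PySem.List.pySetD (PySem.List.pyGetD v r []) c true)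

def pvDirections : List (Int × Int) := [(-1, 0), (1, 0), (0, -1), (0, 1)]

-- the body of A's 'for dr, dc in directions' over the state (queue, visited, diamonds)
def pvBfsStep (rows cols : Int) (grid : List (List String)) (row col : Int)
    (st : List (Int × Int) × List (List Bool) × Int) :
    List (Int × Int) × List (List Bool) × Int :=
  pvDirections.foldl (fun st dir =>
    let new_row := row + dir.1
    let new_col := col + dir.2
    if 0 ≤ new_row ∧ new_row < rows ∧ 0 ≤ new_col ∧ new_col < cols then
      if pvGetV st.2.1 new_row new_col = false ∧ pvCell grid new_row new_col ≠ "#" then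
        (st.1 ++ [(new_row, new_col)], pvSetV st.2.1 new_row new_col,
          st.2.2 + (if pvCell grid new_row new_col = "D" then 1 else 0))
      else st
    else st) st

-- A's 'while queue:' loop; the fuel only makes the recursion structural and is never exhausted
def pvBfsLoop (rows cols : Int) (grid : List (List String)) :
    Nat → List (Int × Int) → List (List Bool) → Int → List (List Bool) × Int
  | 0, _, visited, diamonds => (visited, diamonds)
  | fuel + 1, queue, visited, diamonds =>
    match queue with
    | [] => (visited, diamonds)
    | (row, col) :: rest =>
      let st := pvBfsStep rows cols grid row col (rest, visited, diamonds)
      pvBfsLoop rows cols grid fuel st.1 st.2.1 st.2.2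

def pvBfs (rows cols : Int) (grid : List (List String)) (start_row start_col : Int)
    (visited : List (List Bool)) : List (List Bool) × Int :=
  pvBfsLoop rows cols grid (rows.toNat * cols.toNat + 1) [(start_row, start_col)]
    (pvSetV visited start_row start_col)
    (if pvCell grid start_row start_col = "D" then 1 else 0)

def max_diamonds (rows : Int) (cols : Int) (grid : List (List String)) : Int :=
  ((PySem.List.pyRange 0 rows 1).foldl (fun st r =>
    (PySem.List.pyRange 0 cols 1).foldl (fun st c =>
      if pvGetV st.1 r c = false ∧ pvCell grid r c ≠ "#" then
        let res := pvBfs rows cols grid r c st.1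
        (res.1, if res.2 > st.2 then res.2 else st.2)
      else st) st)
    ((PySem.List.pyRange 0 rows 1).map (fun _ => (PySem.List.pyRange 0 cols 1).map (fun _ => false)),
      (0 : Int))).2

-- ===== PORT B =====
-- the in-range passable neighbours of one cell (B's set comprehension, for one source cell)
def pvNbrs (rows cols : Int) (grid : List (List String)) (p : Int × Int) : List (Int × Int) :=
  [(p.1 - 1, p.2), (p.1 + 1, p.2), (p.1, p.2 - 1), (p.1, p.2 + 1)].filter
    (fun q => decide (0 ≤ q.1 ∧ q.1 < rows ∧ 0 ≤ q.2 ∧ q.2 < cols)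
      && decide (pvCell grid q.1 q.2 ≠ "#"))

-- comp | {neighbours of comp}
def pvExpand (rows cols : Int) (grid : List (List String)) (comp : PySem.Set (Int × Int)) :
    PySem.Set (Int × Int) :=
  PySem.Set.union comp (PySem.Set.ofList (comp.flatMap (pvNbrs rows cols grid)))

-- B's 'for _ in range(rows*cols): new = …; if len(new) == len(comp): break; comp = new'
def pvSaturate (rows cols : Int) (grid : List (List String)) :
    Nat → PySem.Set (Int × Int) → PySem.Set (Int × Int)
  | 0, comp => comp
  | n + 1, comp =>
    let new := pvExpand rows cols grid comp
    if PySem.Set.len new = PySem.Set.len comp then comp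
    else pvSaturate rows cols grid n new

def max_diamonds_alt (rows : Int) (cols : Int) (grid : List (List String)) : Int :=
  ((PySem.List.pyRange 0 rows 1).foldl (fun st r =>
    (PySem.List.pyRange 0 cols 1).foldl (fun st c =>
      if pvCell grid r c = "#" ∨ PySem.Set.contains st.1 (r, c) = true then st
      else
        let comp := pvSaturate rows cols grid (rows * cols).toNat (PySem.Set.ofList [(r, c)])
        (PySem.Set.union st.1 comp,
          max st.2 ((comp.filter (fun p => pvCell grid p.1 p.2 == "D")).length : Int))) st)
    (PySem.Set.empty, (0 : Int))).2

-- ===== PRECONDITION & SPEC =====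
-- Pre_ excludes exactly the inputs where Python A raises IndexError: some scanned cell
-- grid[r][c] (0 ≤ r < rows, 0 ≤ c < cols) is missing, i.e. the grid is smaller than rows × cols.
def Pre_max_diamonds (rows : Int) (cols : Int) (grid : List (List String)) : Prop :=
  rows ≤ 0 ∨ cols ≤ 0 ∨
    (rows ≤ (grid.length : Int) ∧ ∀ row ∈ grid.take rows.toNat, cols ≤ (row.length : Int))
instance (rows : Int) (cols : Int) (grid : List (List String)) :
    Decidable (Pre_max_diamonds rows cols grid) := by unfold Pre_max_diamonds; infer_instance

def pvWitness_max_diamonds : Int × Int × List (List String) :=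
  (2, 2, [["D", "#"], [".", "D"]])

def Spec_max_diamonds (rows : Int) (cols : Int) (grid : List (List String)) (out : Int) : Prop :=
  out = max_diamonds_alt rows cols grid
instance (rows : Int) (cols : Int) (grid : List (List String)) (out : Int) :
    Decidable (Spec_max_diamonds rows cols grid out) := by unfold Spec_max_diamonds; infer_instance

-- ===== CLAIM (what is proved, stated in full; the proofs are below) =====
def Claim_equal_max_diamonds : Prop := ∀ (rows : Int) (cols : Int) (grid : List (List String)), Dom_max_diamonds rows cols grid → Pre_max_diamonds rows cols grid → Spec_max_diamonds rows cols grid (max_diamonds rows cols grid)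

-- ===== LEMMAS AND PROOFS =====

-- in-bounds test, passability, adjacency (all Bool so every Finset filter is decidable)
def inBB (rows cols : Int) (p : Int × Int) : Bool :=
  decide (0 ≤ p.1 ∧ p.1 < rows ∧ 0 ≤ p.2 ∧ p.2 < cols)

def passB (rows cols : Int) (grid : List (List String)) (p : Int × Int) : Bool :=
  inBB rows cols p && decide (pvCell grid p.1 p.2 ≠ "#")

def adjB (rows cols : Int) (grid : List (List String)) (p q : Int × Int) : Bool :=
  passB rows cols grid p && passB rows cols grid q &&
    decide (q = (p.1 - 1, p.2) ∨ q = (p.1 + 1, p.2) ∨ q = (p.1, p.2 - 1) ∨ q = (p.1, p.2 + 1))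

def Reach (rows cols : Int) (grid : List (List String)) : (Int × Int) → (Int × Int) → Prop :=
  Relation.ReflTransGen (fun p q => adjB rows cols grid p q = true)

noncomputable def cellsF (rows cols : Int) : Finset (Int × Int) :=
  Finset.Icc 0 (rows - 1) ×ˢ Finset.Icc 0 (cols - 1)

def isD (grid : List (List String)) (p : Int × Int) : Bool :=
  decide (pvCell grid p.1 p.2 = "D")

noncomputable def Vf (rows cols : Int) (v : List (List Bool)) : Finset (Int × Int) :=
  (cellsF rows cols).filter (fun p => pvGetV v p.1 p.2 = true)

noncomputable def dcnt (grid : List (List String)) (F : Finset (Int × Int)) : Nat :=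
  (F.filter (fun p => isD grid p = true)).card

noncomputable def DV (rows cols : Int) (grid : List (List String)) (v : List (List Bool)) : Nat :=
  dcnt grid (Vf rows cols v)

def dimsV (rows cols : Int) (v : List (List Bool)) : Prop :=
  v.length = rows.toNat ∧ ∀ row ∈ v, row.length = cols.toNat

def closedV (rows cols : Int) (grid : List (List String)) (F : Finset (Int × Int)) : Prop :=
  ∀ p ∈ F, ∀ q, adjB rows cols grid p q = true → q ∈ F

noncomputable def stepF (rows cols : Int) (grid : List (List String)) (F : Finset (Int × Int)) :
    Finset (Int × Int) :=
  F ∪ (cellsF rows cols).filter (fun q => ∃ x ∈ F, adjB rows cols grid x q = true)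

noncomputable def compN (rows cols : Int) (grid : List (List String)) (p : Int × Int) : Finset (Int × Int) :=
  (stepF rows cols grid)^[rows.toNat * cols.toNat] {p}

theorem mem_cellsF (rows cols : Int) (p : Int × Int) :
    p ∈ cellsF rows cols ↔ inBB rows cols p = true := by
  simp only [cellsF, Finset.mem_product, Finset.mem_Icc, inBB, decide_eq_true_eq]; omega

theorem card_cellsF (rows cols : Int) : (cellsF rows cols).card = rows.toNat * cols.toNat := by
  simp [cellsF, Int.card_Icc]


-- ---------- visited-matrix lemmas ----------

theorem dims_setV {rows cols r c : Int} {v : List (List Bool)} (hd : dimsV rows cols v)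
    (h : inBB rows cols (r, c) = true) : dimsV rows cols (pvSetV v r c) := by
  obtain ⟨hl, hrow⟩ := hd
  simp only [inBB, decide_eq_true_eq] at h
  have hrN : r.toNat < v.length := by omega
  have e1 : pvSetV v r c = v.set r.toNat (v[r.toNat].set c.toNat true) := by
    rw [pvSetV, PySem.List.pyGetD_eq_getElem _ _ h.1 (by simp only [hl]; omega),
        PySem.List.pySetD_of_nonneg _ _ h.2.2.1, PySem.List.pySetD_of_nonneg _ _ h.1]
  rw [e1]
  refine ⟨by simp [hl], ?_⟩
  intro row hmem
  rcases List.mem_or_eq_of_mem_set hmem with h1 | h1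
  · exact hrow _ h1
  · subst h1
    rw [List.length_set]
    exact hrow _ (List.getElem_mem hrN)

theorem getV_setV {rows cols r c r' c' : Int} {v : List (List Bool)} (hd : dimsV rows cols v)
    (h : inBB rows cols (r, c) = true) (h' : inBB rows cols (r', c') = true) :
    pvGetV (pvSetV v r c) r' c' = if r' = r ∧ c' = c then true else pvGetV v r' c' := by
  obtain ⟨hl, hrow⟩ := hd
  simp only [inBB, decide_eq_true_eq] at h h'
  have hrN : r.toNat < v.length := by omega
  have hr'N : r'.toNat < v.length := by omega
  have hlen : ∀ (k : Nat) (hk : k < v.length), (v[k]).length = cols.toNat :=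
    fun k hk => hrow _ (List.getElem_mem hk)
  have e1 : pvSetV v r c = v.set r.toNat (v[r.toNat].set c.toNat true) := by
    rw [pvSetV, PySem.List.pyGetD_eq_getElem _ _ h.1 (by simp only [hl]; omega),
        PySem.List.pySetD_of_nonneg _ _ h.2.2.1, PySem.List.pySetD_of_nonneg _ _ h.1]
  rw [e1, pvGetV,
    PySem.List.pyGetD_eq_getElem _ _ h'.1 (by simp only [List.length_set, hl]; omega),
    List.getElem_set]
  by_cases hrr : r.toNat = r'.toNat
  · rw [if_pos hrr]
    rw [PySem.List.pyGetD_eq_getElem _ _ h'.2.2.1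
        (by simp only [List.length_set]; rw [hlen _ hrN]; omega),
      List.getElem_set]
    by_cases hcc : c.toNat = c'.toNat
    · rw [if_pos hcc, if_pos (by constructor <;> omega)]
    · rw [if_neg hcc, if_neg (by rintro ⟨h1, h2⟩; omega)]
      rw [pvGetV, PySem.List.pyGetD_eq_getElem _ _ h'.1 (by simp only [hl]; omega),
          PySem.List.pyGetD_eq_getElem _ _ h'.2.2.1 (by rw [hlen _ hr'N]; omega)]
      simp only [hrr]
  · rw [if_neg hrr, if_neg (by rintro ⟨h1, h2⟩; omega)]
    rw [PySem.List.pyGetD_eq_getElem _ _ h'.2.2.1 (by rw [hlen _ hr'N]; omega)]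
    rw [pvGetV, PySem.List.pyGetD_eq_getElem _ _ h'.1 (by simp only [hl]; omega),
        PySem.List.pyGetD_eq_getElem _ _ h'.2.2.1 (by rw [hlen _ hr'N]; omega)]

theorem mem_Vf {rows cols : Int} {v : List (List Bool)} {p : Int × Int} :
    p ∈ Vf rows cols v ↔ inBB rows cols p = true ∧ pvGetV v p.1 p.2 = true := by
  simp [Vf, Finset.mem_filter, mem_cellsF]

theorem Vf_setV {rows cols : Int} {v : List (List Bool)} {p : Int × Int} (hd : dimsV rows cols v)
    (h : inBB rows cols p = true) :
    Vf rows cols (pvSetV v p.1 p.2) = insert p (Vf rows cols v) := by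
  ext q
  obtain ⟨r, c⟩ := p
  obtain ⟨r', c'⟩ := q
  rw [mem_Vf, Finset.mem_insert, mem_Vf]
  constructor
  · rintro ⟨hq, hget⟩
    rw [getV_setV hd h hq] at hget
    split_ifs at hget with he
    · left; simp [Prod.ext_iff] at he ⊢; omega
    · right; exact ⟨hq, hget⟩
  · rintro (he | ⟨hq, hget⟩)
    · obtain ⟨h1, h2⟩ := Prod.mk.injEq .. ▸ he
      refine ⟨by simpa [h1, h2] using h, ?_⟩
      simp only [Prod.mk.injEq] at he
      rw [getV_setV hd h (by simpa [he.1, he.2] using h), if_pos ⟨he.1, he.2⟩]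
    · refine ⟨hq, ?_⟩
      rw [getV_setV hd h hq]
      split_ifs with he
      · rfl
      · exact hget
theorem Vf_card_le {rows cols : Int} (v : List (List Bool)) :
    (Vf rows cols v).card ≤ rows.toNat * cols.toNat := by
  rw [← card_cellsF rows cols]
  exact Finset.card_le_card (Finset.filter_subset _ _)

-- the initial all-False matrix
theorem pyGetD_const_false (xs : List Bool) (i : Int) (h : ∀ x ∈ xs, x = false) :
    PySem.List.pyGetD xs i false = false := by
  simp only [PySem.List.pyGetD]
  cases hg : PySem.List.pyGet? xs i with
  | none => simp
  | some b => simpa using h _ (PySem.List.mem_of_pyGet?_eq_some _ hg)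

theorem getV_replicate (m n : Nat) (r c : Int) :
    pvGetV (List.replicate m (List.replicate n false)) r c = false := by
  rw [pvGetV]
  apply pyGetD_const_false
  intro x hx
  simp only [PySem.List.pyGetD] at hx
  cases hg : PySem.List.pyGet? (List.replicate m (List.replicate n (false : Bool))) r with
  | none => rw [hg] at hx; simp at hx
  | some row =>
    rw [hg] at hx
    have hmem := PySem.List.mem_of_pyGet?_eq_some _ hg
    rw [List.eq_of_mem_replicate hmem] at hx
    simp only [Option.getD_some] at hx
    exact List.eq_of_mem_replicate hx
theorem dims_v0 (rows cols : Int) :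
    dimsV rows cols ((PySem.List.pyRange 0 rows 1).map
      (fun _ => (PySem.List.pyRange 0 cols 1).map (fun _ => false))) := by
  constructor
  · simp [PySem.List.length_pyRange_one]
  · intro row hmem
    simp only [List.mem_map] at hmem
    obtain ⟨_, _, hr⟩ := hmem
    simp [← hr, PySem.List.length_pyRange_one]

theorem Vf_v0 (rows cols : Int) :
    Vf rows cols ((PySem.List.pyRange 0 rows 1).map
      (fun _ => (PySem.List.pyRange 0 cols 1).map (fun _ => false))) = ∅ := by
  ext p
  rw [mem_Vf]
  simp only [Finset.notMem_empty, iff_false, not_and]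
  intro _
  simp [getV_replicate, PySem.List.length_pyRange_one]

-- ---------- adjacency and reachability ----------

theorem adjB_pass {rows cols : Int} {grid : List (List String)} {p q : Int × Int}
    (h : adjB rows cols grid p q = true) :
    passB rows cols grid p = true ∧ passB rows cols grid q = true := by
  simp only [adjB, Bool.and_eq_true] at h
  exact ⟨h.1.1, h.1.2⟩

theorem adjB_symm {rows cols : Int} {grid : List (List String)} {p q : Int × Int}
    (h : adjB rows cols grid p q = true) : adjB rows cols grid q p = true := by
  simp only [adjB, Bool.and_eq_true, decide_eq_true_eq] at h ⊢
  obtain ⟨⟨hp, hq⟩, hshape⟩ := h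
  refine ⟨⟨hq, hp⟩, ?_⟩
  obtain ⟨a, b⟩ := p; obtain ⟨x, y⟩ := q
  simp only [Prod.mk.injEq] at hshape ⊢
  omega

theorem adjB_cases {rows cols : Int} {grid : List (List String)} {p q : Int × Int}
    (h : adjB rows cols grid p q = true) :
    q = (p.1 - 1, p.2) ∨ q = (p.1 + 1, p.2) ∨ q = (p.1, p.2 - 1) ∨ q = (p.1, p.2 + 1) := by
  simp only [adjB, Bool.and_eq_true, decide_eq_true_eq] at h
  exact h.2

theorem adjB_intro {rows cols : Int} {grid : List (List String)} {p q : Int × Int}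
    (hp : passB rows cols grid p = true) (hq : passB rows cols grid q = true)
    (hs : q = (p.1 - 1, p.2) ∨ q = (p.1 + 1, p.2) ∨ q = (p.1, p.2 - 1) ∨ q = (p.1, p.2 + 1)) :
    adjB rows cols grid p q = true := by
  simp only [adjB, Bool.and_eq_true, decide_eq_true_eq]
  exact ⟨⟨hp, hq⟩, hs⟩

theorem reach_symm {rows cols : Int} {grid : List (List String)} {p q : Int × Int}
    (h : Reach rows cols grid p q) : Reach rows cols grid q p :=
  Relation.ReflTransGen.symmetric (fun _ _ hxy => adjB_symm hxy) h

theorem reach_mem_closed {rows cols : Int} {grid : List (List String)} {F : Finset (Int × Int)}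
    (hc : closedV rows cols grid F) {p q : Int × Int} (hp : p ∈ F)
    (h : Reach rows cols grid p q) : q ∈ F := by
  induction h with
  | refl => exact hp
  | tail _ hadj ih => exact hc _ ih _ hadj

-- ---------- the saturation operator and the component as its fixpoint ----------

theorem subset_stepF {rows cols : Int} {grid : List (List String)} (F : Finset (Int × Int)) :
    F ⊆ stepF rows cols grid F := Finset.subset_union_left

theorem mem_stepF {rows cols : Int} {grid : List (List String)} {F : Finset (Int × Int)}
    {q : Int × Int} :
    q ∈ stepF rows cols grid F ↔
      q ∈ F ∨ (q ∈ cellsF rows cols ∧ ∃ x ∈ F, adjB rows cols grid x q = true) := by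
  simp [stepF, Finset.mem_union, Finset.mem_filter]

theorem subset_iterate {rows cols : Int} {grid : List (List String)} (F : Finset (Int × Int))
    (k : Nat) : F ⊆ (stepF rows cols grid)^[k] F := by
  induction k with
  | zero => simp
  | succ k ih =>
    rw [Function.iterate_succ_apply']
    exact ih.trans (subset_stepF _)

theorem iterate_sound {rows cols : Int} {grid : List (List String)} {p q : Int × Int}
    (k : Nat) (h : q ∈ (stepF rows cols grid)^[k] {p}) : Reach rows cols grid p q := by
  induction k generalizing q with
  | zero => simp at h; subst h; exact Relation.ReflTransGen.refl
  | succ k ih =>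
    rw [Function.iterate_succ_apply'] at h
    rcases mem_stepF.mp h with h1 | ⟨_, x, hx, hadj⟩
    · exact ih h1
    · exact Relation.ReflTransGen.tail (ih hx) hadj

theorem fix_iterate {rows cols : Int} {grid : List (List String)} {F : Finset (Int × Int)}
    (hfix : stepF rows cols grid F = F) (m : Nat) : (stepF rows cols grid)^[m] F = F := by
  induction m with
  | zero => rfl
  | succ m ih => rw [Function.iterate_succ_apply', ih, hfix]

theorem iterate_card_grow {rows cols : Int} {grid : List (List String)} {p : Int × Int}
    (k : Nat)
    (h : ∀ j < k, (stepF rows cols grid)^[j + 1] {p} ≠ (stepF rows cols grid)^[j] {p}) :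
    k + 1 ≤ ((stepF rows cols grid)^[k] {p}).card := by
  induction k with
  | zero => simp
  | succ k ih =>
    have hk : k + 1 ≤ ((stepF rows cols grid)^[k] {p}).card :=
      ih (fun j hj => h j (by omega))
    have hne : (stepF rows cols grid)^[k + 1] {p} ≠ (stepF rows cols grid)^[k] {p} :=
      h k (by omega)
    have hne' := hne
    rw [Function.iterate_succ_apply'] at hne'
    have hss : (stepF rows cols grid)^[k] {p} ⊂ (stepF rows cols grid)^[k + 1] {p} := by
      rw [Function.iterate_succ_apply']
      exact Finset.ssubset_iff_subset_ne.mpr ⟨subset_stepF _, fun he => hne' he.symm⟩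
    have := Finset.card_lt_card hss
    omega

theorem iterate_subset_cells {rows cols : Int} {grid : List (List String)} {p : Int × Int}
    (hp : p ∈ cellsF rows cols) (k : Nat) :
    (stepF rows cols grid)^[k] {p} ⊆ cellsF rows cols := by
  induction k with
  | zero => simpa using hp
  | succ k ih =>
    rw [Function.iterate_succ_apply']
    intro q hq
    rcases mem_stepF.mp hq with h1 | ⟨h1, _⟩
    · exact ih h1
    · exact h1

theorem passB_mem_cells {rows cols : Int} {grid : List (List String)} {p : Int × Int}
    (hp : passB rows cols grid p = true) : p ∈ cellsF rows cols := by
  rw [mem_cellsF]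
  simp only [passB, Bool.and_eq_true] at hp
  exact hp.1

theorem compN_fixed {rows cols : Int} {grid : List (List String)} {p : Int × Int}
    (hp : passB rows cols grid p = true) :
    stepF rows cols grid (compN rows cols grid p) = compN rows cols grid p := by
  set N := rows.toNat * cols.toNat with hN
  have hcard : ∀ k, ((stepF rows cols grid)^[k] {p}).card ≤ N := by
    intro k
    rw [hN, ← card_cellsF rows cols]
    exact Finset.card_le_card (iterate_subset_cells (passB_mem_cells hp) k)
  have hex : ∃ j < N, (stepF rows cols grid)^[j + 1] {p} = (stepF rows cols grid)^[j] {p} := by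
    by_contra hcon
    push Not at hcon
    have := iterate_card_grow (rows := rows) (cols := cols) (grid := grid) (p := p) N hcon
    have := hcard N
    omega
  obtain ⟨j, hj, hfix⟩ := hex
  have hfix' : stepF rows cols grid ((stepF rows cols grid)^[j] {p}) =
      (stepF rows cols grid)^[j] {p} := by
    rw [Function.iterate_succ_apply'] at hfix; exact hfix
  have hNj : (stepF rows cols grid)^[N] {p} = (stepF rows cols grid)^[j] {p} := by
    have : N = (N - j) + j := by omega
    rw [this, Function.iterate_add_apply]
    exact fix_iterate hfix' _
  rw [compN, ← hN, hNj, hfix']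

theorem mem_compN {rows cols : Int} {grid : List (List String)} {p q : Int × Int}
    (hp : passB rows cols grid p = true) :
    q ∈ compN rows cols grid p ↔ Reach rows cols grid p q := by
  constructor
  · exact iterate_sound _
  · intro h
    induction h with
    | refl => exact subset_iterate {p} _ (by simp)
    | tail _ hadj ih =>
      rw [← compN_fixed hp]
      exact mem_stepF.mpr (Or.inr ⟨passB_mem_cells (adjB_pass hadj).2, _, ih, hadj⟩)

theorem compN_self {rows cols : Int} {grid : List (List String)} {p : Int × Int}
    (hp : passB rows cols grid p = true) : p ∈ compN rows cols grid p :=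
  (mem_compN hp).mpr Relation.ReflTransGen.refl
theorem compN_disjoint {rows cols : Int} {grid : List (List String)} {F : Finset (Int × Int)}
    (hc : closedV rows cols grid F) {p : Int × Int} (hp : passB rows cols grid p = true)
    (hnp : p ∉ F) : ∀ x ∈ compN rows cols grid p, x ∉ F := by
  intro x hx hxF
  exact hnp (reach_mem_closed hc hxF (reach_symm ((mem_compN hp).mp hx)))

-- ---------- port B's saturation computes compN ----------

theorem beq_string_eq (a b : String) : (a == b) = decide (a = b) := by
  by_cases h : a = b <;> simp [h]

theorem mem_pvNbrs {rows cols : Int} {grid : List (List String)} {p q : Int × Int}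
    (hp : passB rows cols grid p = true) :
    q ∈ pvNbrs rows cols grid p ↔ adjB rows cols grid p q = true := by
  simp only [pvNbrs, List.mem_filter, Bool.and_eq_true, decide_eq_true_eq, List.mem_cons,
    List.not_mem_nil, or_false]
  constructor
  · rintro ⟨hshape, hin, hcell⟩
    exact adjB_intro hp (by simp [passB, inBB]; exact ⟨by omega, hcell⟩)
      (by tauto)
  · intro hadj
    have hq := (adjB_pass hadj).2
    simp only [passB, inBB, Bool.and_eq_true, decide_eq_true_eq] at hq
    exact ⟨by have := adjB_cases hadj; tauto, by omega, hq.2⟩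

theorem expand_spec {rows cols : Int} {grid : List (List String)} {comp : PySem.Set (Int × Int)}
    (hnd : comp.Nodup) (hpass : ∀ x ∈ comp, passB rows cols grid x = true) :
    (pvExpand rows cols grid comp).Nodup ∧
    (∀ x ∈ pvExpand rows cols grid comp, passB rows cols grid x = true) ∧
    (pvExpand rows cols grid comp).toFinset = stepF rows cols grid comp.toFinset := by
  have hmem : ∀ y, y ∈ pvExpand rows cols grid comp ↔
      y ∈ comp ∨ ∃ x ∈ comp, adjB rows cols grid x y = true := by
    intro y
    rw [pvExpand, PySem.Set.mem_union, PySem.Set.mem_ofList, List.mem_flatMap]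
    constructor
    · rintro (h | ⟨x, hx, hy⟩)
      · exact Or.inl h
      · exact Or.inr ⟨x, hx, (mem_pvNbrs (hpass x hx)).mp hy⟩
    · rintro (h | ⟨x, hx, hy⟩)
      · exact Or.inl h
      · exact Or.inr ⟨x, hx, (mem_pvNbrs (hpass x hx)).mpr hy⟩
  refine ⟨PySem.Set.nodup_union _ _ hnd, ?_, ?_⟩
  · intro x hx
    rcases (hmem x).mp hx with h | ⟨y, hy, hadj⟩
    · exact hpass x h
    · exact (adjB_pass hadj).2
  · ext y
    rw [List.mem_toFinset, hmem y, mem_stepF]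
    constructor
    · rintro (h | ⟨x, hx, hadj⟩)
      · exact Or.inl (List.mem_toFinset.mpr h)
      · exact Or.inr ⟨passB_mem_cells (adjB_pass hadj).2, x, List.mem_toFinset.mpr hx, hadj⟩
    · rintro (h | ⟨_, x, hx, hadj⟩)
      · exact Or.inl (List.mem_toFinset.mp h)
      · exact Or.inr ⟨x, List.mem_toFinset.mp hx, hadj⟩

theorem saturate_spec {rows cols : Int} {grid : List (List String)} :
    ∀ (n : Nat) (comp : PySem.Set (Int × Int)), comp.Nodup →
    (∀ x ∈ comp, passB rows cols grid x = true) →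
    (pvSaturate rows cols grid n comp).Nodup ∧
    (∀ x ∈ pvSaturate rows cols grid n comp, passB rows cols grid x = true) ∧
    (pvSaturate rows cols grid n comp).toFinset = (stepF rows cols grid)^[n] comp.toFinset := by
  intro n
  induction n with
  | zero => intro comp hnd hpass; exact ⟨hnd, hpass, rfl⟩
  | succ n ih =>
    intro comp hnd hpass
    obtain ⟨hnd', hpass', hstep⟩ := expand_spec hnd hpass
    rw [pvSaturate]
    by_cases hlen : PySem.Set.len (pvExpand rows cols grid comp) = PySem.Set.len comp
    · rw [if_pos hlen]
      have hsub : comp.toFinset ⊆ (pvExpand rows cols grid comp).toFinset := by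
        intro y hy
        rw [List.mem_toFinset] at hy ⊢
        rw [pvExpand, PySem.Set.mem_union]
        exact Or.inl hy
      have hcards : (pvExpand rows cols grid comp).toFinset.card = comp.toFinset.card := by
        rw [List.toFinset_card_of_nodup hnd', List.toFinset_card_of_nodup hnd]
        simp only [PySem.Set.len] at hlen
        omega
      have hfixF : stepF rows cols grid comp.toFinset = comp.toFinset := by
        rw [← hstep]
        exact (Finset.eq_of_subset_of_card_le hsub (le_of_eq hcards)).symm
      exact ⟨hnd, hpass, (fix_iterate hfixF (n + 1)).symm⟩
    · rw [if_neg hlen]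
      obtain ⟨h1, h2, h3⟩ := ih (pvExpand rows cols grid comp) hnd' hpass'
      refine ⟨h1, h2, ?_⟩
      rw [h3, hstep, ← Function.iterate_succ_apply]

theorem saturate_comp {rows cols : Int} {grid : List (List String)} {p : Int × Int}
    (hp : passB rows cols grid p = true) :
    (pvSaturate rows cols grid (rows * cols).toNat (PySem.Set.ofList [p])).Nodup ∧
    (pvSaturate rows cols grid (rows * cols).toNat (PySem.Set.ofList [p])).toFinset =
      compN rows cols grid p := by
  have hrc : 0 < rows ∧ 0 < cols := by
    have := passB_mem_cells hp
    rw [mem_cellsF] at this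
    simp only [inBB, decide_eq_true_eq] at this
    omega
  have hN : (rows * cols).toNat = rows.toNat * cols.toNat := by
    have h1 : rows = (rows.toNat : Int) := by omega
    have h2 : cols = (cols.toNat : Int) := by omega
    conv_lhs => rw [h1, h2]
    rw [← Nat.cast_mul, Int.toNat_natCast]
  have hnd0 : (PySem.Set.ofList [p]).Nodup := PySem.Set.nodup_ofList _
  have hmem0 : ∀ x, x ∈ PySem.Set.ofList [p] ↔ x = p := by
    intro x; rw [PySem.Set.mem_ofList]; simp
  obtain ⟨h1, _, h3⟩ := saturate_spec (rows := rows) (cols := cols) (grid := grid)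
    (rows * cols).toNat (PySem.Set.ofList [p]) hnd0
    (fun x hx => by rw [hmem0 x] at hx; subst hx; exact hp)
  refine ⟨h1, ?_⟩
  have he : (PySem.Set.ofList [p]).toFinset = {p} := by
    ext y
    rw [List.mem_toFinset, hmem0 y, Finset.mem_singleton]
  rw [h3, hN, compN, he]

theorem filter_count_eq_dcnt {grid : List (List String)} {comp : List (Int × Int)}
    (hnd : comp.Nodup) :
    (comp.filter (fun p => pvCell grid p.1 p.2 == "D")).length = dcnt grid comp.toFinset := by
  rw [dcnt]
  have hpred : (fun p : Int × Int => pvCell grid p.1 p.2 == "D") = fun p => isD grid p := by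
    funext p
    rw [isD, beq_string_eq]
  rw [hpred, ← List.toFinset_card_of_nodup (hnd.filter _), List.toFinset_filter]

theorem union_toFinset {s t : PySem.Set (Int × Int)} :
    (PySem.Set.union s t).toFinset = s.toFinset ∪ t.toFinset := by
  ext y
  simp [PySem.Set.mem_union]

-- ---------- port A's BFS: one pass over the four directions ----------

theorem DV_setV {rows cols : Int} {grid : List (List String)} {v : List (List Bool)}
    {p : Int × Int} (hd : dimsV rows cols v) (hin : inBB rows cols p = true)
    (hnot : p ∉ Vf rows cols v) :
    (DV rows cols grid (pvSetV v p.1 p.2) : Int) =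
      DV rows cols grid v + (if pvCell grid p.1 p.2 = "D" then 1 else 0) := by
  rw [DV, DV, dcnt, dcnt, Vf_setV hd hin, Finset.filter_insert]
  by_cases hD : isD grid p = true
  · have hD' : pvCell grid p.1 p.2 = "D" := by simpa [isD] using hD
    rw [if_pos hD, if_pos hD',
      Finset.card_insert_of_notMem (fun hmem => hnot (Finset.mem_of_mem_filter _ hmem))]
    push_cast
    ring
  · have hD' : ¬ pvCell grid p.1 p.2 = "D" := by simpa [isD] using hD
    rw [if_neg hD, if_neg hD']
    ring

-- the body of A's direction loop, written without the lets (defeq to the port's lambda)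
def dirStep (rows cols : Int) (grid : List (List String)) (row col : Int)
    (st : List (Int × Int) × List (List Bool) × Int) (dir : Int × Int) :
    List (Int × Int) × List (List Bool) × Int :=
  if 0 ≤ row + dir.1 ∧ row + dir.1 < rows ∧ 0 ≤ col + dir.2 ∧ col + dir.2 < cols then
    if pvGetV st.2.1 (row + dir.1) (col + dir.2) = false ∧
        pvCell grid (row + dir.1) (col + dir.2) ≠ "#" then
      (st.1 ++ [(row + dir.1, col + dir.2)], pvSetV st.2.1 (row + dir.1) (col + dir.2),
        st.2.2 + (if pvCell grid (row + dir.1) (col + dir.2) = "D" then 1 else 0))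
    else st
  else st
theorem dirStep_fold_spec {rows cols : Int} {grid : List (List String)} {row col : Int}
    (hp : passB rows cols grid (row, col) = true) :
    ∀ (dirs : List (Int × Int)) (rest : List (Int × Int)) (v : List (List Bool)) (d : Int),
    dimsV rows cols v →
    (∀ dir ∈ dirs, dir = ((-1 : Int), (0 : Int)) ∨ dir = (1, 0) ∨ dir = (0, -1) ∨ dir = (0, 1)) →
    dimsV rows cols (dirs.foldl (dirStep rows cols grid row col) (rest, v, d)).2.1 ∧
    Vf rows cols v ⊆ Vf rows cols (dirs.foldl (dirStep rows cols grid row col) (rest, v, d)).2.1 ∧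
    (∃ new : List (Int × Int),
      (dirs.foldl (dirStep rows cols grid row col) (rest, v, d)).1 = rest ++ new ∧
      Vf rows cols (dirs.foldl (dirStep rows cols grid row col) (rest, v, d)).2.1 =
        Vf rows cols v ∪ new.toFinset ∧
      (Vf rows cols (dirs.foldl (dirStep rows cols grid row col) (rest, v, d)).2.1).card =
        (Vf rows cols v).card + new.length ∧
      ∀ x ∈ new, adjB rows cols grid (row, col) x = true) ∧
    ((dirs.foldl (dirStep rows cols grid row col) (rest, v, d)).2.2 +
        (DV rows cols grid v : Int) =
      d + DV rows cols grid (dirs.foldl (dirStep rows cols grid row col) (rest, v, d)).2.1) ∧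
    (∀ dir ∈ dirs, adjB rows cols grid (row, col) (row + dir.1, col + dir.2) = true →
      (row + dir.1, col + dir.2) ∈
        Vf rows cols (dirs.foldl (dirStep rows cols grid row col) (rest, v, d)).2.1) := by
  intro dirs
  induction dirs with
  | nil =>
    intro rest v d hd _
    simp only [List.foldl_nil]
    exact ⟨hd, Finset.Subset.refl _, ⟨[], by simp, by simp, by simp, by simp⟩, by simp, by simp⟩
  | cons dir dirs ih =>
    intro rest v d hd hdirs
    simp only [List.foldl_cons]
    by_cases hb : 0 ≤ row + dir.1 ∧ row + dir.1 < rows ∧ 0 ≤ col + dir.2 ∧ col + dir.2 < cols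
    · by_cases hg : pvGetV v (row + dir.1) (col + dir.2) = false ∧
          pvCell grid (row + dir.1) (col + dir.2) ≠ "#"
      · have estep : dirStep rows cols grid row col (rest, v, d) dir =
            (rest ++ [(row + dir.1, col + dir.2)], pvSetV v (row + dir.1) (col + dir.2),
              d + (if pvCell grid (row + dir.1) (col + dir.2) = "D" then 1 else 0)) := by
          rw [dirStep]
          rw [if_pos hb, if_pos hg]
        rw [estep]
        have hin : inBB rows cols (row + dir.1, col + dir.2) = true := by
          simp only [inBB, decide_eq_true_eq]; exact hb
        have hnot : (row + dir.1, col + dir.2) ∉ Vf rows cols v := by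
          rw [mem_Vf]
          rintro ⟨_, hgv⟩
          simp [hg.1] at hgv
        have hpassc : passB rows cols grid (row + dir.1, col + dir.2) = true := by
          simp only [passB, hin, Bool.and_eq_true, decide_eq_true_eq, true_and]
          exact hg.2
        have hadjc : adjB rows cols grid (row, col) (row + dir.1, col + dir.2) = true := by
          refine adjB_intro hp hpassc ?_
          rcases hdirs dir (by simp) with h | h | h | h <;>
            (subst h; simp [Prod.ext_iff]; try omega)
        have hd' := dims_setV (r := row + dir.1) (c := col + dir.2) hd hin
        obtain ⟨ih1, ih2, ⟨new, hq, hVf, hcard, hadjnew⟩, ihd, ihcov⟩ :=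
          ih (rest ++ [(row + dir.1, col + dir.2)])
            (pvSetV v (row + dir.1) (col + dir.2))
            (d + (if pvCell grid (row + dir.1) (col + dir.2) = "D" then 1 else 0)) hd'
            (fun d hdm => hdirs d (by simp [hdm]))
        have hVset : Vf rows cols (pvSetV v (row + dir.1) (col + dir.2)) =
            insert (row + dir.1, col + dir.2) (Vf rows cols v) :=
          Vf_setV (p := (row + dir.1, col + dir.2)) hd hin
        have hDVset := DV_setV (grid := grid) (p := (row + dir.1, col + dir.2)) hd hin hnot
        refine ⟨ih1, ?_, ⟨(row + dir.1, col + dir.2) :: new, ?_, ?_, ?_, ?_⟩, ?_, ?_⟩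
        · intro x hx
          exact ih2 (by rw [hVset]; exact Finset.mem_insert_of_mem hx)
        · rw [hq, List.append_assoc]; rfl
        · rw [hVf, hVset, List.toFinset_cons]
          rw [Finset.insert_union, Finset.union_comm, Finset.union_insert, Finset.union_comm]
        · rw [hcard, hVset, Finset.card_insert_of_notMem hnot, List.length_cons]
          ring
        · intro x hx
          rcases List.mem_cons.mp hx with h | h
          · subst h; exact hadjc
          · exact hadjnew _ h
        · linarith [ihd, hDVset]
        · intro dir' hdir' hadj'
          rcases List.mem_cons.mp hdir' with h | h
          · subst h
            exact ih2 (by rw [hVset]; exact Finset.mem_insert_self _ _)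
          · exact ihcov dir' h hadj'
      · have estep : dirStep rows cols grid row col (rest, v, d) dir = (rest, v, d) := by
          rw [dirStep]
          rw [if_pos hb, if_neg hg]
        rw [estep]
        obtain ⟨ih1, ih2, ih3, ihd, ihcov⟩ := ih rest v d hd
          (fun d hdm => hdirs d (by simp [hdm]))
        refine ⟨ih1, ih2, ih3, ihd, ?_⟩
        intro dir' hdir' hadj'
        rcases List.mem_cons.mp hdir' with h | h
        · subst h
          -- the candidate was already visited (it is passable, so the grid test holds)
          have hpassc := (adjB_pass hadj').2
          have hcell : pvCell grid (row + dir'.1) (col + dir'.2) ≠ "#" := by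
            simp only [passB, Bool.and_eq_true, decide_eq_true_eq] at hpassc
            exact hpassc.2
          have hgv : pvGetV v (row + dir'.1) (col + dir'.2) = true := by
            by_contra hfalse
            exact hg ⟨by simpa using hfalse, hcell⟩
          apply ih2
          rw [mem_Vf]
          exact ⟨by simp only [inBB, decide_eq_true_eq]; exact hb, hgv⟩
        · exact ihcov dir' h hadj'
    · have estep : dirStep rows cols grid row col (rest, v, d) dir = (rest, v, d) := by
        rw [dirStep]
        rw [if_neg hb]
      rw [estep]
      obtain ⟨ih1, ih2, ih3, ihd, ihcov⟩ := ih rest v d hd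
        (fun d hdm => hdirs d (by simp [hdm]))
      refine ⟨ih1, ih2, ih3, ihd, ?_⟩
      intro dir' hdir' hadj'
      rcases List.mem_cons.mp hdir' with h | h
      · subst h
        have hpassc := (adjB_pass hadj').2
        have : inBB rows cols (row + dir'.1, col + dir'.2) = true := by
          simp only [passB, Bool.and_eq_true] at hpassc
          exact hpassc.1
        simp only [inBB, decide_eq_true_eq] at this
        exact absurd this hb
      · exact ihcov dir' h hadj'

-- ---------- port A's BFS loop ----------

theorem cover_of_dirs {rows cols : Int} {grid : List (List String)} {row col : Int}
    {S : Finset (Int × Int)}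
    (h : ∀ dir ∈ pvDirections, adjB rows cols grid (row, col) (row + dir.1, col + dir.2) = true →
      (row + dir.1, col + dir.2) ∈ S) :
    ∀ q, adjB rows cols grid (row, col) q = true → q ∈ S := by
  intro q hadj
  rcases adjB_cases hadj with h1 | h1 | h1 | h1 <;> subst h1
  · have h2 := h (-1, 0) (by simp [pvDirections])
    have e : ((row + ((-1 : Int), (0 : Int)).1, col + ((-1 : Int), (0 : Int)).2) : Int × Int) =
        (row - 1, col) := by simp [Prod.ext_iff]; try omega
    rw [e] at h2
    exact h2 hadj
  · have h2 := h (1, 0) (by simp [pvDirections])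
    have e : ((row + ((1 : Int), (0 : Int)).1, col + ((1 : Int), (0 : Int)).2) : Int × Int) =
        (row + 1, col) := by simp
    rw [e] at h2
    exact h2 hadj
  · have h2 := h (0, -1) (by simp [pvDirections])
    have e : ((row + ((0 : Int), (-1 : Int)).1, col + ((0 : Int), (-1 : Int)).2) : Int × Int) =
        (row, col - 1) := by simp; omega
    rw [e] at h2
    exact h2 hadj
  · have h2 := h (0, 1) (by simp [pvDirections])
    have e : ((row + ((0 : Int), (1 : Int)).1, col + ((0 : Int), (1 : Int)).2) : Int × Int) =
        (row, col + 1) := by simp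
    rw [e] at h2
    exact h2 hadj

theorem bfsLoop_spec {rows cols : Int} {grid : List (List String)} :
    ∀ (fuel : Nat) (queue : List (Int × Int)) (v : List (List Bool)) (d : Int),
    dimsV rows cols v →
    (∀ p ∈ queue, p ∈ Vf rows cols v ∧ passB rows cols grid p = true) →
    (∀ p ∈ Vf rows cols v, p ∉ queue → ∀ q, adjB rows cols grid p q = true → q ∈ Vf rows cols v) →
    (rows.toNat * cols.toNat - (Vf rows cols v).card) + queue.length < fuel →
    dimsV rows cols (pvBfsLoop rows cols grid fuel queue v d).1 ∧
    Vf rows cols v ⊆ Vf rows cols (pvBfsLoop rows cols grid fuel queue v d).1 ∧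
    closedV rows cols grid (Vf rows cols (pvBfsLoop rows cols grid fuel queue v d).1) ∧
    (∀ x ∈ Vf rows cols (pvBfsLoop rows cols grid fuel queue v d).1,
      x ∈ Vf rows cols v ∨ ∃ p ∈ queue, Reach rows cols grid p x) ∧
    ((pvBfsLoop rows cols grid fuel queue v d).2 + (DV rows cols grid v : Int) =
      d + DV rows cols grid (pvBfsLoop rows cols grid fuel queue v d).1) := by
  intro fuel
  induction fuel with
  | zero =>
    intro queue v d _ _ _ hmeas
    omega
  | succ fuel ih =>
    intro queue v d hd hq2 hq3 hmeas
    match queue with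
    | [] =>
      refine ⟨hd, Finset.Subset.refl _, ?_, fun x hx => Or.inl hx, by simp [pvBfsLoop]⟩
      intro p hp q hadj
      exact hq3 p hp (by simp) q hadj
    | (row, col) :: rest =>
      have hploop : pvBfsLoop rows cols grid (fuel + 1) ((row, col) :: rest) v d =
          pvBfsLoop rows cols grid fuel
            (pvDirections.foldl (dirStep rows cols grid row col) (rest, v, d)).1
            (pvDirections.foldl (dirStep rows cols grid row col) (rest, v, d)).2.1
            (pvDirections.foldl (dirStep rows cols grid row col) (rest, v, d)).2.2 := rfl
      have hp : passB rows cols grid (row, col) = true := (hq2 (row, col) (by simp)).2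
      obtain ⟨hdim1, hsub1, ⟨new, hq1, hVf1, hcard1, hadjnew⟩, hDeq1, hcov⟩ :=
        dirStep_fold_spec hp pvDirections rest v d hd
          (fun dir hdm => by simpa [pvDirections] using hdm)
      set st := pvDirections.foldl (dirStep rows cols grid row col) (rest, v, d) with hstdef
      have hnewmem : ∀ x ∈ new, x ∈ Vf rows cols st.2.1 := by
        intro x hx
        rw [hVf1]
        exact Finset.mem_union_right _ (List.mem_toFinset.mpr hx)
      have hq2' : ∀ p ∈ st.1, p ∈ Vf rows cols st.2.1 ∧ passB rows cols grid p = true := by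
        rw [hq1]
        intro p hpmem
        rcases List.mem_append.mp hpmem with h | h
        · obtain ⟨hm, hpass⟩ := hq2 p (by simp [h])
          exact ⟨hsub1 hm, hpass⟩
        · exact ⟨hnewmem p h, (adjB_pass (hadjnew p h)).2⟩
      have hq3' : ∀ p ∈ Vf rows cols st.2.1, p ∉ st.1 →
          ∀ q, adjB rows cols grid p q = true → q ∈ Vf rows cols st.2.1 := by
        intro p hpv hpnot q hadj
        rw [hq1] at hpnot
        rw [hVf1] at hpv
        rcases Finset.mem_union.mp hpv with h | h
        · by_cases hcase : p = (row, col)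
          · subst hcase
            exact cover_of_dirs hcov q hadj
          · by_cases hrest : p ∈ rest
            · exact absurd (List.mem_append.mpr (Or.inl hrest)) hpnot
            · have := hq3 p h (by simp [hcase, hrest]) q hadj
              exact hsub1 this
        · exact absurd (List.mem_append.mpr (Or.inr (List.mem_toFinset.mp h))) hpnot
      have hcardle := Vf_card_le (rows := rows) (cols := cols) st.2.1
      have hmeas' : (rows.toNat * cols.toNat - (Vf rows cols st.2.1).card) + st.1.length < fuel := by
        rw [hq1, List.length_append]
        simp only [List.length_cons] at hmeas
        omega
      obtain ⟨ihdim, ihsub, ihclosed, ihsound, ihd⟩ := ih st.1 st.2.1 st.2.2 hdim1 hq2' hq3' hmeas'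
      rw [hploop]
      refine ⟨ihdim, hsub1.trans ihsub, ihclosed, ?_, by linarith [hDeq1, ihd]⟩
      intro x hx
      rcases ihsound x hx with h | ⟨p, hpmem, hreach⟩
      · rw [hVf1] at h
        rcases Finset.mem_union.mp h with h | h
        · exact Or.inl h
        · exact Or.inr ⟨(row, col), by simp,
            Relation.ReflTransGen.single (hadjnew x (List.mem_toFinset.mp h))⟩
      · rw [hq1] at hpmem
        rcases List.mem_append.mp hpmem with h | h
        · exact Or.inr ⟨p, by simp [h], hreach⟩
        · exact Or.inr ⟨(row, col), by simp,
            Relation.ReflTransGen.trans (Relation.ReflTransGen.single (hadjnew p h)) hreach⟩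

theorem pvBfs_spec {rows cols : Int} {grid : List (List String)} {v : List (List Bool)}
    {p : Int × Int} (hd : dimsV rows cols v) (hclosed : closedV rows cols grid (Vf rows cols v))
    (hp : passB rows cols grid p = true) (hnot : p ∉ Vf rows cols v) :
    dimsV rows cols (pvBfs rows cols grid p.1 p.2 v).1 ∧
    Vf rows cols (pvBfs rows cols grid p.1 p.2 v).1 = Vf rows cols v ∪ compN rows cols grid p ∧
    closedV rows cols grid (Vf rows cols (pvBfs rows cols grid p.1 p.2 v).1) ∧
    (pvBfs rows cols grid p.1 p.2 v).2 = (dcnt grid (compN rows cols grid p) : Int) := by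
  have hin : inBB rows cols p = true := by
    simp only [passB, Bool.and_eq_true] at hp
    exact hp.1
  have hd1 : dimsV rows cols (pvSetV v p.1 p.2) := by
    have := dims_setV (r := p.1) (c := p.2) hd (by simpa using hin)
    exact this
  have hVf1 : Vf rows cols (pvSetV v p.1 p.2) = insert p (Vf rows cols v) := Vf_setV hd hin
  have hq2 : ∀ x ∈ [p], x ∈ Vf rows cols (pvSetV v p.1 p.2) ∧ passB rows cols grid x = true := by
    intro x hx
    simp only [List.mem_singleton] at hx
    subst hx
    exact ⟨by rw [hVf1]; exact Finset.mem_insert_self _ _, hp⟩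
  have hq3 : ∀ x ∈ Vf rows cols (pvSetV v p.1 p.2), x ∉ [p] →
      ∀ q, adjB rows cols grid x q = true → q ∈ Vf rows cols (pvSetV v p.1 p.2) := by
    intro x hxv hxnot q hadj
    rw [hVf1] at hxv ⊢
    rcases Finset.mem_insert.mp hxv with h | h
    · exact absurd (by simp [h]) hxnot
    · exact Finset.mem_insert_of_mem (hclosed x h q hadj)
  have hmeas : (rows.toNat * cols.toNat - (Vf rows cols (pvSetV v p.1 p.2)).card) +
      ([p] : List (Int × Int)).length < rows.toNat * cols.toNat + 1 := by
    have h1 : 0 < (Vf rows cols (pvSetV v p.1 p.2)).card := by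
      rw [hVf1]
      exact Finset.card_pos.mpr ⟨p, Finset.mem_insert_self _ _⟩
    have h2 := Vf_card_le (rows := rows) (cols := cols) (pvSetV v p.1 p.2)
    simp only [List.length_singleton]
    omega
  obtain ⟨hdim, hsub, hcl, hsound, hDeq⟩ := bfsLoop_spec (rows.toNat * cols.toNat + 1) [p]
    (pvSetV v p.1 p.2) (if pvCell grid p.1 p.2 = "D" then 1 else 0) hd1 hq2 hq3 hmeas
  have hres : pvBfs rows cols grid p.1 p.2 v =
      pvBfsLoop rows cols grid (rows.toNat * cols.toNat + 1) [p] (pvSetV v p.1 p.2)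
        (if pvCell grid p.1 p.2 = "D" then 1 else 0) := by
    rw [pvBfs]
  rw [hres]
  have hdisj : ∀ x ∈ compN rows cols grid p, x ∉ Vf rows cols v := compN_disjoint hclosed hp hnot
  have hVfeq : Vf rows cols (pvBfsLoop rows cols grid (rows.toNat * cols.toNat + 1) [p]
      (pvSetV v p.1 p.2) (if pvCell grid p.1 p.2 = "D" then 1 else 0)).1 =
      Vf rows cols v ∪ compN rows cols grid p := by
    apply Finset.Subset.antisymm
    · intro x hx
      rcases hsound x hx with h | ⟨q, hqmem, hreach⟩
      · rw [hVf1] at h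
        rcases Finset.mem_insert.mp h with h | h
        · subst h
          exact Finset.mem_union_right _ (compN_self hp)
        · exact Finset.mem_union_left _ h
      · simp only [List.mem_singleton] at hqmem
        subst hqmem
        exact Finset.mem_union_right _ ((mem_compN hp).mpr hreach)
    · intro x hx
      rcases Finset.mem_union.mp hx with h | h
      · exact hsub (by rw [hVf1]; exact Finset.mem_insert_of_mem h)
      · exact reach_mem_closed hcl (hsub (by rw [hVf1]; exact Finset.mem_insert_self _ _))
          ((mem_compN hp).mp h)
  refine ⟨hdim, hVfeq, hcl, ?_⟩
  have hDV1 := DV_setV (grid := grid) hd hin hnot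
  have hDVfin : (DV rows cols grid (pvBfsLoop rows cols grid (rows.toNat * cols.toNat + 1) [p]
      (pvSetV v p.1 p.2) (if pvCell grid p.1 p.2 = "D" then 1 else 0)).1 : Int) =
      DV rows cols grid v + dcnt grid (compN rows cols grid p) := by
    rw [DV, hVfeq, dcnt, Finset.filter_union,
      Finset.card_union_of_disjoint]
    · simp only [DV, dcnt]
      push_cast
      ring
    · rw [Finset.disjoint_left]
      intro a ha hb
      exact hdisj a (Finset.mem_of_mem_filter _ hb) (Finset.mem_of_mem_filter _ ha)
  have hind : (DV rows cols grid (pvSetV v p.1 p.2) : Int) =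
      DV rows cols grid v + (if pvCell grid p.1 p.2 = "D" then 1 else 0) := hDV1
  linarith [hDeq, hDVfin, hind]

-- ---------- the outer scan: both ports fold the same abstract step ----------

def stepA (rows cols : Int) (grid : List (List String)) (st : List (List Bool) × Int)
    (p : Int × Int) : List (List Bool) × Int :=
  if pvGetV st.1 p.1 p.2 = false ∧ pvCell grid p.1 p.2 ≠ "#" then
    ((pvBfs rows cols grid p.1 p.2 st.1).1,
      if (pvBfs rows cols grid p.1 p.2 st.1).2 > st.2 then (pvBfs rows cols grid p.1 p.2 st.1).2
      else st.2)
  else st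

def stepB (rows cols : Int) (grid : List (List String)) (st : PySem.Set (Int × Int) × Int)
    (p : Int × Int) : PySem.Set (Int × Int) × Int :=
  if pvCell grid p.1 p.2 = "#" ∨ PySem.Set.contains st.1 p = true then st
  else
    (PySem.Set.union st.1 (pvSaturate rows cols grid (rows * cols).toNat (PySem.Set.ofList [p])),
      max st.2 (((pvSaturate rows cols grid (rows * cols).toNat
        (PySem.Set.ofList [p])).filter (fun q => pvCell grid q.1 q.2 == "D")).length : Int))

theorem max_diamonds_eq_fold (rows cols : Int) (grid : List (List String)) :
    max_diamonds rows cols grid =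
      (((PySem.List.pyRange 0 rows 1).flatMap
          (fun r => (PySem.List.pyRange 0 cols 1).map (fun c => (r, c)))).foldl
        (stepA rows cols grid)
        ((PySem.List.pyRange 0 rows 1).map
          (fun _ => (PySem.List.pyRange 0 cols 1).map (fun _ => false)), (0 : Int))).2 := by
  rw [max_diamonds, List.foldl_flatMap]
  simp only [List.foldl_map]
  rfl

theorem max_diamonds_alt_eq_fold (rows cols : Int) (grid : List (List String)) :
    max_diamonds_alt rows cols grid =
      (((PySem.List.pyRange 0 rows 1).flatMap
          (fun r => (PySem.List.pyRange 0 cols 1).map (fun c => (r, c)))).foldl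
        (stepB rows cols grid) (PySem.Set.empty, (0 : Int))).2 := by
  rw [max_diamonds_alt, List.foldl_flatMap]
  simp only [List.foldl_map]
  rfl

theorem outer_fold_eq {rows cols : Int} {grid : List (List String)} :
    ∀ (cells : List (Int × Int)) (vA : List (List Bool)) (done : PySem.Set (Int × Int))
      (bestA bestB : Int),
    (∀ p ∈ cells, inBB rows cols p = true) →
    dimsV rows cols vA → done.Nodup → Vf rows cols vA = done.toFinset →
    closedV rows cols grid (Vf rows cols vA) → bestA = bestB →
    (cells.foldl (stepA rows cols grid) (vA, bestA)).2 =
      (cells.foldl (stepB rows cols grid) (done, bestB)).2 := by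
  intro cells
  induction cells with
  | nil =>
    intro vA done bestA bestB _ _ _ _ _ hbest
    simpa using hbest
  | cons p cells ih =>
    intro vA done bestA bestB hcells hd hnd hVfdone hclosed hbest
    have hinp : inBB rows cols p = true := hcells p (by simp)
    have hmemiff : PySem.Set.contains done p = true ↔ p ∈ Vf rows cols vA := by
      rw [PySem.Set.contains_iff, hVfdone, List.mem_toFinset]
    simp only [List.foldl_cons]
    by_cases hfire : pvCell grid p.1 p.2 ≠ "#" ∧ p ∉ Vf rows cols vA
    · have hgv : pvGetV vA p.1 p.2 = false := by
        rcases Bool.eq_false_or_eq_true (pvGetV vA p.1 p.2) with h | h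
        · exact absurd (mem_Vf.mpr ⟨hinp, h⟩) hfire.2
        · exact h
      have hpassp : passB rows cols grid p = true := by
        simp only [passB, hinp, Bool.and_eq_true, decide_eq_true_eq, true_and]
        exact hfire.1
      have heA : stepA rows cols grid (vA, bestA) p =
          ((pvBfs rows cols grid p.1 p.2 vA).1,
            if (pvBfs rows cols grid p.1 p.2 vA).2 > bestA then (pvBfs rows cols grid p.1 p.2 vA).2
            else bestA) := by
        rw [stepA, if_pos ⟨hgv, hfire.1⟩]
      have heB : stepB rows cols grid (done, bestB) p =
          (PySem.Set.union done (pvSaturate rows cols grid (rows * cols).toNat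
              (PySem.Set.ofList [p])),
            max bestB (((pvSaturate rows cols grid (rows * cols).toNat
              (PySem.Set.ofList [p])).filter (fun q => pvCell grid q.1 q.2 == "D")).length : Int)) := by
        rw [stepB, if_neg]
        rw [not_or]
        exact ⟨fun h => hfire.1 h, fun h => hfire.2 (hmemiff.mp (by simpa using h))⟩
      rw [heA, heB]
      obtain ⟨hdim', hVf', hclosed', hcnt⟩ := pvBfs_spec hd hclosed hpassp hfire.2
      obtain ⟨hndsat, hsatF⟩ := saturate_comp (grid := grid) hpassp
      have hcntB : (((pvSaturate rows cols grid (rows * cols).toNat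
          (PySem.Set.ofList [p])).filter (fun q => pvCell grid q.1 q.2 == "D")).length : Int) =
          (dcnt grid (compN rows cols grid p) : Int) := by
        rw [filter_count_eq_dcnt hndsat, hsatF]
      apply ih
      · exact fun q hq => hcells q (by simp [hq])
      · exact hdim'
      · exact PySem.Set.nodup_union _ _ hnd
      · rw [hVf', union_toFinset, hVfdone, hsatF]
      · exact hclosed'
      · rw [hcnt, hcntB]
        split_ifs with h <;> omega
    · have heA : stepA rows cols grid (vA, bestA) p = (vA, bestA) := by
        rw [stepA, if_neg]
        rintro ⟨hgv, hcell⟩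
        exact hfire ⟨hcell, fun hmem => by simp [(mem_Vf.mp hmem).2] at hgv⟩
      have heB : stepB rows cols grid (done, bestB) p = (done, bestB) := by
        rw [stepB, if_pos]
        by_cases hcell : pvCell grid p.1 p.2 = "#"
        · exact Or.inl hcell
        · refine Or.inr (hmemiff.mpr ?_)
          by_contra hmem
          exact hfire ⟨hcell, hmem⟩
      rw [heA, heB]
      exact ih _ _ _ _ (fun q hq => hcells q (by simp [hq])) hd hnd hVfdone hclosed hbest

theorem max_diamonds_spec : Claim_equal_max_diamonds := by
  intro rows cols grid _hdom _hpre
  show max_diamonds rows cols grid = max_diamonds_alt rows cols grid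
  rw [max_diamonds_eq_fold, max_diamonds_alt_eq_fold]
  apply outer_fold_eq
  · intro p hp
    simp only [List.mem_flatMap, List.mem_map] at hp
    obtain ⟨r, hr, c, hc, hpc⟩ := hp
    rw [PySem.List.mem_pyRange_one] at hr hc
    subst hpc
    simp only [inBB, decide_eq_true_eq]
    omega
  · exact dims_v0 rows cols
  · exact List.nodup_nil
  · rw [Vf_v0]
    rfl
  · rw [Vf_v0]
    intro q hq
    exact absurd hq (Finset.notMem_empty q)
  · rfl
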